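-- pv_equiv track=rewrite | github.com/aaronzhfeng/MoE_experiments | hetero_moe/utils/smiles.py | ids_to_tokens
-- ===== SOURCE A (Python) =====
-- from typing import List
--
-- def ids_to_tokens(itos: List[str], ids: List[int], eos_id: int = 3, pad_id: int = 0) -> List[str]:
--     toks: List[str] = []
--     for tid in ids:
--         if tid == pad_id:
--             continue
--         if tid == eos_id:
--             break
--         if 0 <= tid < len(itos):
--             toks.append(itos[tid])
--     return toks
-- ===== SOURCE B (Python) =====
-- from typing import List
--
-- def ids_to_tokens(itos: List[str], ids: List[int], eos_id: int = 3, pad_id: int = 0) -> List[str]: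
--     # truncate at the first real EOS (a tid equal to pad_id is padding, never EOS), then filter
--     cut = next((i for i, t in enumerate(ids) if t == eos_id and t != pad_id), len(ids))
--     return [itos[t] for t in ids[:cut] if t != pad_id and 0 <= t < len(itos)]
-- ===== Notes on version B (the rewrite author's own statement) =====
-- stated objective: idiomatic
-- what changed: Replaces A's single loop with break/continue by a two-pass truncate-then-filter: find the first effective EOS index, slice, and build the result with one comprehension.
import Mathlib
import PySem

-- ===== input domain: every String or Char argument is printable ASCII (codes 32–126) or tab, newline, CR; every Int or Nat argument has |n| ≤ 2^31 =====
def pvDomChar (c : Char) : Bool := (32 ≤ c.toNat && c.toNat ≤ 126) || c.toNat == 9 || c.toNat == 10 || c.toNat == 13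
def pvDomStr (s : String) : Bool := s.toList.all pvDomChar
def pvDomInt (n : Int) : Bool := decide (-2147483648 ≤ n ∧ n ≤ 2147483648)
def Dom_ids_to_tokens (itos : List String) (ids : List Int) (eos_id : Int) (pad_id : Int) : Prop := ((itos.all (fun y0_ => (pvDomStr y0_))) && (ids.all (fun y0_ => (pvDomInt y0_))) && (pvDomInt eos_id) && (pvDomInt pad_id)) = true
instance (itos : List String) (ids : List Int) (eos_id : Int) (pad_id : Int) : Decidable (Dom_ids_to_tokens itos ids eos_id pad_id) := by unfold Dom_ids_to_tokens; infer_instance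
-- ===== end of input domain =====

-- B: truncate-at-first-effective-EOS then filter (two passes), vs A's single loop with break/continue; return values proved equal.
-- ===== PORT A =====
-- loop over ids with accumulator toks; pad -> continue, eos -> break, in-range -> append
def ids_to_tokens_go (itos : List String) (eos_id : Int) (pad_id : Int) (toks : List String) : List Int → List String
  | [] => toks
  | tid :: rest =>
    if tid = pad_id then ids_to_tokens_go itos eos_id pad_id toks rest
    else if tid = eos_id then toks
    else if 0 ≤ tid ∧ tid < (itos.length : Int) then
      -- itos[tid]: index proven in range by the guard, so getD is exact here
      ids_to_tokens_go itos eos_id pad_id (toks ++ [itos.getD tid.toNat ""]) rest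
    else ids_to_tokens_go itos eos_id pad_id toks rest

def ids_to_tokens (itos : List String) (ids : List Int) (eos_id : Int) (pad_id : Int) : List String :=
  ids_to_tokens_go itos eos_id pad_id [] ids

-- ===== PORT B =====
def ids_to_tokens_alt (itos : List String) (ids : List Int) (eos_id : Int) (pad_id : Int) : List String :=
  let cut := (ids.findIdx? (fun t => t == eos_id && t != pad_id)).getD ids.length
  (ids.take cut).filterMap (fun t =>
    if t ≠ pad_id ∧ 0 ≤ t ∧ t < (itos.length : Int) then some (itos.getD t.toNat "") else none)

-- ===== PRECONDITION & SPEC =====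
def Spec_ids_to_tokens (itos : List String) (ids : List Int) (eos_id : Int) (pad_id : Int) (out : List String) : Prop := out = ids_to_tokens_alt itos ids eos_id pad_id
instance (itos : List String) (ids : List Int) (eos_id : Int) (pad_id : Int) (out : List String) : Decidable (Spec_ids_to_tokens itos ids eos_id pad_id out) := by unfold Spec_ids_to_tokens; infer_instance

-- ===== CLAIM (what is proved, stated in full; the proofs are below) =====
def Claim_equal_ids_to_tokens : Prop := ∀ (itos : List String) (ids : List Int) (eos_id : Int) (pad_id : Int), Dom_ids_to_tokens itos ids eos_id pad_id → Spec_ids_to_tokens itos ids eos_id pad_id (ids_to_tokens itos ids eos_id pad_id)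

-- ===== LEMMAS AND PROOFS =====
-- B unfolds one list element at a time
theorem alt_nil (itos : List String) (eos_id pad_id : Int) :
    ids_to_tokens_alt itos [] eos_id pad_id = [] := rfl

theorem alt_cons (itos : List String) (t : Int) (rest : List Int) (eos_id pad_id : Int) :
    ids_to_tokens_alt itos (t :: rest) eos_id pad_id =
      if t = eos_id ∧ t ≠ pad_id then []
      else (if t ≠ pad_id ∧ 0 ≤ t ∧ t < (itos.length : Int) then [itos.getD t.toNat ""] else [])
            ++ ids_to_tokens_alt itos rest eos_id pad_id := by
  unfold ids_to_tokens_alt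
  simp only [List.findIdx?_cons]
  by_cases h : t = eos_id ∧ t ≠ pad_id
  · obtain ⟨he, hp⟩ := h
    subst he
    simp [hp]
  · have hb : (t == eos_id && t != pad_id) = false := by
      simp only [Bool.and_eq_false_iff, bne_eq_false_iff_eq]
      by_cases h1 : t = eos_id
      · right; by_cases h2 : t = pad_id <;> simp_all
      · left; simp [h1]
    simp only [hb, if_neg h, Bool.false_eq_true, if_false]
    cases hf : rest.findIdx? (fun t => t == eos_id && t != pad_id) with
    | none =>
        by_cases hc : t ≠ pad_id ∧ 0 ≤ t ∧ t < (itos.length : Int) <;>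
          simp [hc]
    | some k =>
        by_cases hc : t ≠ pad_id ∧ 0 ≤ t ∧ t < (itos.length : Int) <;>
          simp [hc]

theorem go_eq (itos : List String) (eos_id pad_id : Int) (l : List Int) :
    ∀ toks, ids_to_tokens_go itos eos_id pad_id toks l =
      toks ++ ids_to_tokens_alt itos l eos_id pad_id := by
  induction l with
  | nil => intro toks; simp [ids_to_tokens_go, alt_nil]
  | cons t rest ih =>
    intro toks
    rw [alt_cons]
    by_cases hp : t = pad_id
    · simp [ids_to_tokens_go, hp, ih]
    · by_cases he : t = eos_id
      · subst he
        simp [ids_to_tokens_go, hp]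
      · by_cases hr : 0 ≤ t ∧ t < (itos.length : Int)
        · simp [ids_to_tokens_go, hp, he, hr, ih]
        · simp [ids_to_tokens_go, hp, he, hr, ih]

-- ===== VERDICT (by name: the statement is the Claim_ definition above) =====
theorem ids_to_tokens_spec : Claim_equal_ids_to_tokens := by
  intro itos ids eos_id pad_id _
  unfold Spec_ids_to_tokens ids_to_tokens
  simpa using go_eq itos eos_id pad_id ids []
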